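-- pv_equiv track=rewrite | github.com/Stuycs-K/finalproject-10-buff-otto-shore-constanza-tong-janet | decode.py | decode2
-- ===== SOURCE A (Python) =====
-- def decode2(byte_array, increment):
--     message_bits = ""
--     message = ""
--     for i in range(0, len(byte_array), increment):
--         curr_byte = byte_array[i]
--         if (curr_byte & 192) == 192:
--             message_bits += str(byte_array[i] & 1)
--     for i in range(0, len(message_bits), 8):
--         message += chr(int(message_bits[i:i+8], 2))
--
--     return message.split("&&&&")[0]
-- ===== SOURCE B (Python) =====
-- def decode2(byte_array, increment):
--     chars = []
--     acc = 0
--     nbits = 0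
--     for i in range(0, len(byte_array), increment):
--         b = byte_array[i]
--         if (b & 192) == 192:
--             acc = acc * 2 + (b & 1)
--             nbits += 1
--             if nbits == 8:
--                 chars.append(chr(acc))
--                 acc = 0
--                 nbits = 0
--     if nbits:
--         chars.append(chr(acc))
--     return "".join(chars).split("&&&&")[0]
-- ===== Notes on version B (the rewrite author's own statement) =====
-- stated objective: alternative
-- what changed: Replaces A's two-phase pipeline (build an intermediate '0'/'1' bit string, then slice it 8 characters at a time and int(_, 2)-parse each slice) with a single streaming pass that folds each flagged byte's low bit into an integer accumulator and emits chr(acc) every 8 bits (plus the final partial chunk), so no bit string is ever built or parsed.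
import Mathlib
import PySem

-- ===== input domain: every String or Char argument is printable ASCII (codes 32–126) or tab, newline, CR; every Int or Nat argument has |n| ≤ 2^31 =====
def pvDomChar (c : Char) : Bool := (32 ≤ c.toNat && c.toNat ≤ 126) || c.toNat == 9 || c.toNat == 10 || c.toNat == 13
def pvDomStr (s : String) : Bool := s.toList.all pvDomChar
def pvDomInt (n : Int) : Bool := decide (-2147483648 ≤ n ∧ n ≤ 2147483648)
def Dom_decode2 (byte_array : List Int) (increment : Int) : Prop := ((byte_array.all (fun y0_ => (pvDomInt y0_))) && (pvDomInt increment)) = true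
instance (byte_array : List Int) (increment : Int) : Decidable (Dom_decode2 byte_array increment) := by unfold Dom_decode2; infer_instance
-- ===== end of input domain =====

-- B replaces A's two phases (build a bit string, then slice it 8 chars at a time and int(_,2) each
-- slice) by one streaming pass that accumulates bits into an integer and emits a char every 8 bits;
-- objective: alternative (single pass, no intermediate bit string).

-- ===== PORT A =====
-- int(message_bits[i:i+8], 2) is PySem.Int.ofCharsBase?; it always returns `some` here (the slice is a
-- nonempty string of '0'/'1' digits) and its value is < 256, so the .getD 0 and Char.ofNat defaults are
-- never taken; chr is Char.ofNat, str(n) is PySem.Int.toChars.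
def decode2 (byte_array : List Int) (increment : Int) : String :=
  let message_bits : List Char :=
    (PySem.List.pyRange 0 byte_array.length increment).foldl
      (fun message_bits i =>
        let curr_byte := PySem.List.pyGetD byte_array i 0
        if PySem.Int.band curr_byte 192 = 192 then
          message_bits ++ PySem.Int.toChars (PySem.Int.band (PySem.List.pyGetD byte_array i 0) 1)
        else message_bits) []
  let message : List Char :=
    (PySem.List.pyRange 0 message_bits.length 8).foldl
      (fun message i =>
        message ++ [Char.ofNat ((PySem.Int.ofCharsBase? (PySem.List.slice message_bits (some i) (some (i + 8))) 2).getD 0).toNat])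
      []
  -- message.split("&&&&")[0]: split never returns an empty list, so [0] is the head
  String.ofList ((PySem.Chars.splitOn message "&&&&".toList).headD [])

-- ===== PORT B =====
-- state: (chars, acc, nbits)
def decode2_alt (byte_array : List Int) (increment : Int) : String :=
  let st :=
    (PySem.List.pyRange 0 byte_array.length increment).foldl
      (fun (st : List Char × Int × Int) i =>
        let b := PySem.List.pyGetD byte_array i 0
        if PySem.Int.band b 192 = 192 then
          let acc := st.2.1 * 2 + PySem.Int.band b 1
          let nbits := st.2.2 + 1
          if nbits = 8 then (st.1 ++ [Char.ofNat acc.toNat], 0, 0) else (st.1, acc, nbits)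
        else st)
      ([], 0, 0)
  let chars := if st.2.2 ≠ 0 then st.1 ++ [Char.ofNat st.2.1.toNat] else st.1
  String.ofList ((PySem.Chars.splitOn chars "&&&&".toList).headD [])

-- ===== PRECONDITION & SPEC =====
-- increment = 0 makes Python's range(0, len, increment) raise ValueError; that is the only exception.
def Pre_decode2 (_byte_array : List Int) (increment : Int) : Prop := increment ≠ 0
instance (byte_array : List Int) (increment : Int) : Decidable (Pre_decode2 byte_array increment) := by unfold Pre_decode2; infer_instance
def pvWitness_decode2 : List Int × Int := ([193, 192, 65, 7], 1)

def Spec_decode2 (byte_array : List Int) (increment : Int) (out : String) : Prop := out = decode2_alt byte_array increment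
instance (byte_array : List Int) (increment : Int) (out : String) : Decidable (Spec_decode2 byte_array increment out) := by unfold Spec_decode2; infer_instance

-- ===== CLAIM (what is proved, stated in full; the proofs are below) =====
def Claim_equal_decode2 : Prop := ∀ (byte_array : List Int) (increment : Int), Dom_decode2 byte_array increment → Pre_decode2 byte_array increment → Spec_decode2 byte_array increment (decode2 byte_array increment)

-- ===== LEMMAS AND PROOFS =====

-- the flagged low bits that both programs read, as Bools, in traversal order
def pvBit (ba : List Int) (i : Int) : Bool := decide (PySem.Int.band (PySem.List.pyGetD ba i 0) 1 = 1)
def pvBits (ba : List Int) (idxs : List Int) : List Bool :=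
  idxs.flatMap (fun i =>
    if PySem.Int.band (PySem.List.pyGetD ba i 0) 192 = 192 then [pvBit ba i] else [])

def bitChar (b : Bool) : Char := if b then '1' else '0'
def valB (bs : List Bool) : Nat := bs.foldl (fun a b => 2 * a + (if b then 1 else 0)) 0

-- the common semantics: MSB-first decoding of the bit stream, 8 bits per char, partial last chunk kept
def chDecode (bs : List Bool) : List Char :=
  if bs = [] then [] else Char.ofNat (valB (bs.take 8)) :: chDecode (bs.drop 8)
termination_by bs.length
decreasing_by
  rename_i h
  have : bs.length ≠ 0 := fun hn => h (List.eq_nil_of_length_eq_zero hn)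
  simp [List.length_drop]; omega

lemma band1_cases (x : Int) : PySem.Int.band x 1 = 0 ∨ PySem.Int.band x 1 = 1 := by
  rw [PySem.Int.band_one]
  have h1 := PySem.Int.mod_nonneg x (b := 2) (by norm_num)
  have h2 := PySem.Int.mod_lt x (b := 2) (by norm_num)
  omega

-- ----- A, phase 1: the first loop builds the bit characters -----
lemma toChars_band1 (x : Int) :
    PySem.Int.toChars (PySem.Int.band x 1) = [bitChar (decide (PySem.Int.band x 1 = 1))] := by
  rcases band1_cases x with h | h <;> simp [h, bitChar] <;> decide

lemma phase1 (ba : List Int) (idxs : List Int) (mb : List Char) :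
    idxs.foldl
      (fun message_bits i =>
        let curr_byte := PySem.List.pyGetD ba i 0
        if PySem.Int.band curr_byte 192 = 192 then
          message_bits ++ PySem.Int.toChars (PySem.Int.band (PySem.List.pyGetD ba i 0) 1)
        else message_bits) mb
    = mb ++ (pvBits ba idxs).map bitChar := by
  induction idxs generalizing mb with
  | nil => simp [pvBits]
  | cons i t ih =>
    rw [List.foldl_cons, ih]
    by_cases h : PySem.Int.band (PySem.List.pyGetD ba i 0) 192 = 192
    · simp [pvBits, h, toChars_band1, pvBit]
    · simp [pvBits, h]

-- ----- A, phase 2: the slicing loop computes chDecode -----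
lemma pyRange8_cons (n : Nat) (h : 0 < n) :
    PySem.List.pyRange 0 (n : Int) 8 =
      0 :: (PySem.List.pyRange 0 ((n : Int) - 8) 8).map (· + 8) := by
  rw [PySem.List.pyRange_of_pos _ _ (by norm_num : (0:Int) < 8),
      PySem.List.pyRange_of_pos _ _ (by norm_num : (0:Int) < 8)]
  have hgt : (0:Int) < (n:Int) := by exact_mod_cast h
  have hm : (if (0:Int) < (n:Int) then (((n:Int) - 0 + 8 - 1) / 8).toNat else 0)
      = (if (0:Int) < (n:Int) - 8 then (((n:Int) - 8 - 0 + 8 - 1) / 8).toNat else 0) + 1 := by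
    by_cases h8 : (0:Int) < (n:Int) - 8
    · rw [if_pos hgt, if_pos h8]; omega
    · rw [if_pos hgt, if_neg h8]; omega
  rw [hm, List.range_succ_eq_map]
  simp only [List.map_cons, List.map_map, List.cons.injEq]
  refine ⟨by norm_num, List.map_congr_left ?_⟩
  intro k _
  simp only [Function.comp]
  push_cast
  ring

lemma slice_shift {α : Type} (cs : List α) (j : Int) (hj : 0 ≤ j) :
    PySem.List.slice cs (some (j + 8)) (some (j + 8 + 8)) =
      PySem.List.slice (cs.drop 8) (some j) (some (j + 8)) := by
  rw [PySem.List.slice_toNat _ (by omega) (by omega),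
      PySem.List.slice_toNat _ (by omega) (by omega)]
  rw [List.drop_drop]
  have e1 : (j + 8 + 8).toNat - (j + 8).toNat = 8 := by omega
  have e2 : (j + 8).toNat - j.toNat = 8 := by omega
  have e3 : (j + 8).toNat = 8 + j.toNat := by omega
  rw [e1, e2, e3]

-- all Bool lists of length ≤ n
def allB : Nat → List (List Bool)
  | 0 => [[]]
  | n + 1 => [] :: (allB n).flatMap (fun l => [false :: l, true :: l])

lemma mem_allB (n : Nat) : ∀ l : List Bool, l.length ≤ n → l ∈ allB n := by
  induction n with
  | zero => intro l hl; simp at hl; simp [allB, hl]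
  | succ n ih =>
    intro l hl
    cases l with
    | nil => simp [allB]
    | cons b t =>
      simp only [allB, List.mem_cons, List.mem_flatMap]
      right
      refine ⟨t, ih t (by simpa using Nat.le_of_succ_le_succ (by simpa using hl)), ?_⟩
      cases b <;> simp

set_option maxRecDepth 100000 in
lemma enum_parse : ∀ l ∈ allB 8, l ≠ [] →
    PySem.Int.ofCharsBase? (l.map bitChar) 2 = some ((valB l : Int)) := by decide

lemma chunk_parse (l : List Bool) (h8 : l.length ≤ 8) (h0 : l ≠ []) :
    PySem.Int.ofCharsBase? (l.map bitChar) 2 = some ((valB l : Int)) :=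
  enum_parse l (mem_allB 8 l h8) h0

lemma phase2 (bs : List Bool) : ∀ (m0 : List Char),
    (PySem.List.pyRange 0 ((bs.map bitChar).length : Int) 8).foldl
      (fun message i =>
        message ++ [Char.ofNat ((PySem.Int.ofCharsBase? (PySem.List.slice (bs.map bitChar) (some i) (some (i + 8))) 2).getD 0).toNat])
      m0
    = m0 ++ chDecode bs := by
  induction bs using chDecode.induct with
  | case1 =>
    intro m0
    rw [chDecode]
    simp [PySem.List.pyRange_of_pos _ _ (by norm_num : (0:Int) < 8)]
  | case2 bs hnil ih =>
    intro m0
    have hlen : 0 < bs.length := List.length_pos_of_ne_nil hnil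
    rw [List.length_map, pyRange8_cons bs.length hlen]
    rw [List.foldl_cons, List.foldl_map]
    have hsl0 : PySem.List.slice (bs.map bitChar) (some 0) (some (0 + 8)) = (bs.take 8).map bitChar := by
      rw [PySem.List.slice_toNat _ (by norm_num) (by norm_num)]
      simp [List.map_take]
    have hparse : PySem.Int.ofCharsBase? ((bs.take 8).map bitChar) 2 = some ((valB (bs.take 8) : Int)) :=
      chunk_parse _ (by simp) (by simp [List.take_eq_nil_iff, hnil])
    rw [hsl0, hparse]
    simp only [Option.getD_some, Int.toNat_natCast]
    have hrange : PySem.List.pyRange 0 ((bs.length : Int) - 8) 8 = PySem.List.pyRange 0 (((bs.drop 8).map bitChar).length : Int) 8 := by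
      by_cases h8 : 8 < bs.length
      · have : (((bs.drop 8).map bitChar).length : Int) = (bs.length : Int) - 8 := by
          simp [List.length_drop]; omega
        rw [this]
      · have hd : bs.drop 8 = [] := List.drop_eq_nil_of_le (by omega)
        rw [hd]
        rw [PySem.List.pyRange_of_pos _ _ (by norm_num : (0:Int) < 8),
            PySem.List.pyRange_of_pos _ _ (by norm_num : (0:Int) < 8)]
        rw [if_neg (by omega), if_neg (by norm_num)]
    rw [hrange]
    have hcong := PySem.List.foldl_congr_mem
      (l := PySem.List.pyRange 0 (((bs.drop 8).map bitChar).length : Int) 8)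
      (f := fun message j =>
        message ++ [Char.ofNat ((PySem.Int.ofCharsBase? (PySem.List.slice (bs.map bitChar) (some (j + 8)) (some (j + 8 + 8))) 2).getD 0).toNat])
      (g := fun message j =>
        message ++ [Char.ofNat ((PySem.Int.ofCharsBase? (PySem.List.slice ((bs.drop 8).map bitChar) (some j) (some (j + 8))) 2).getD 0).toNat])
      (init := m0 ++ [Char.ofNat (valB (bs.take 8))])
      (by
        intro acc j hj
        have hj0 : 0 ≤ j :=
          ((PySem.List.mem_pyRange_iff_of_pos (by norm_num : (0:Int) < 8) j).1 hj).1
        beta_reduce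
        rw [slice_shift _ j hj0, List.map_drop])
    rw [hcong, ih]
    conv_rhs => rw [chDecode, if_neg hnil]
    simp

-- ----- B: the fold over indices is a fold over the bit stream -----
def pushB (st : List Char × Int × Int) (b : Bool) : List Char × Int × Int :=
  let acc := st.2.1 * 2 + (if b then 1 else 0)
  let nbits := st.2.2 + 1
  if nbits = 8 then (st.1 ++ [Char.ofNat acc.toNat], 0, 0) else (st.1, acc, nbits)

lemma b_fold_bits (ba : List Int) (idxs : List Int) (st : List Char × Int × Int) :
    idxs.foldl
      (fun (st : List Char × Int × Int) i =>
        let b := PySem.List.pyGetD ba i 0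
        if PySem.Int.band b 192 = 192 then
          let acc := st.2.1 * 2 + PySem.Int.band b 1
          let nbits := st.2.2 + 1
          if nbits = 8 then (st.1 ++ [Char.ofNat acc.toNat], 0, 0) else (st.1, acc, nbits)
        else st) st
    = (pvBits ba idxs).foldl pushB st := by
  induction idxs generalizing st with
  | nil => simp [pvBits]
  | cons i t ih =>
    rw [List.foldl_cons, ih]
    by_cases h : PySem.Int.band (PySem.List.pyGetD ba i 0) 192 = 192
    · have hb : PySem.Int.band (PySem.List.pyGetD ba i 0) 1 = (if pvBit ba i then (1:Int) else 0) := by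
        unfold pvBit
        rcases band1_cases (PySem.List.pyGetD ba i 0) with h1 | h1 <;> simp [h1]
      simp [pvBits, h, hb, pushB]
    · simp [pvBits, h]

def emitB (st : List Char × Int × Int) : List Char :=
  if st.2.2 ≠ 0 then st.1 ++ [Char.ofNat st.2.1.toNat] else st.1

lemma valB_append (p : List Bool) (b : Bool) :
    valB (p ++ [b]) = 2 * valB p + (if b then 1 else 0) := by
  simp [valB, List.foldl_append]

lemma chDecode_cons8 (p : List Bool) (hp : p.length = 8) (bs : List Bool) :
    chDecode (p ++ bs) = Char.ofNat (valB p) :: chDecode bs := by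
  rw [chDecode, if_neg (by simp [← List.length_pos_iff, hp])]
  rw [List.take_left' hp, List.drop_left' hp]

lemma streaming (bs : List Bool) : ∀ (chars : List Char) (p : List Bool), p.length < 8 →
    emitB (bs.foldl pushB (chars, (valB p : Int), (p.length : Int))) = chars ++ chDecode (p ++ bs) := by
  induction bs with
  | nil =>
    intro chars p hp
    simp only [List.foldl_nil, List.append_nil]
    by_cases hP : p = []
    · subst hP; simp [emitB, chDecode]
    · have hl : p.length ≠ 0 := fun hz => hP (List.eq_nil_of_length_eq_zero hz)
      rw [chDecode, if_neg hP]
      rw [List.take_of_length_le (by omega), List.drop_eq_nil_of_le (by omega)]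
      simp [emitB, chDecode, hl]
  | cons b bs ih =>
    intro chars p hp
    rw [List.foldl_cons]
    have hv : (valB p : Int) * 2 + (if b then (1:Int) else 0) = (valB (p ++ [b]) : Int) := by
      rw [valB_append]; push_cast; cases b <;> simp <;> ring
    by_cases h8 : p.length = 7
    · have hstep : pushB (chars, (valB p : Int), (p.length : Int)) b
          = (chars ++ [Char.ofNat (valB (p ++ [b]))], ((valB ([] : List Bool)) : Int), ((([] : List Bool).length : Int))) := by
        simp [pushB, h8, valB]
        congr 1
        cases b <;> simp <;> omega
      rw [hstep, ih _ [] (by norm_num)]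
      have : p ++ b :: bs = (p ++ [b]) ++ bs := by simp
      rw [this, chDecode_cons8 (p ++ [b]) (by simp [h8]) bs]
      simp
    · have hstep : pushB (chars, (valB p : Int), (p.length : Int)) b
          = (chars, (valB (p ++ [b]) : Int), (((p ++ [b]).length : Int))) := by
        have hne : ((p.length : Int)) + 1 ≠ 8 := by omega
        simp [pushB, hv, hne, List.length_append]
      rw [hstep, ih _ (p ++ [b]) (by simp; omega)]
      simp

-- ===== VERDICT (by name: the statement is the Claim_ definition above) =====
theorem decode2_spec : Claim_equal_decode2 := by
  unfold Claim_equal_decode2 Spec_decode2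
  intro ba inc _ _
  simp only [decode2, decode2_alt]
  rw [phase1, b_fold_bits]
  rw [List.nil_append, phase2]
  have hB := streaming (pvBits ba (PySem.List.pyRange 0 (ba.length : Int) inc)) [] [] (by norm_num)
  simp only [valB, List.foldl_nil, List.length_nil, Nat.cast_zero, List.nil_append] at hB
  rw [List.nil_append]
  unfold emitB at hB
  rw [hB]
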